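-- pv_equiv track=rewrite | github.com/gmaxdm/stgospel | gospel/management/commands/parse_calendar.py | __remove_asterix_sups
-- ===== SOURCE A (Python) =====
-- def __remove_asterix_sups(data):
--     """ expecting data like "** note2"
--     """
--     i = 0
--     for c in data:
--         if c == "*":
--             i += 1
--         elif i and c == " ":
--             # including the space after
--             i += 1
--             break
--         else:
--             break
--     return data[i:]
-- ===== SOURCE B (Python) =====
-- import re
--
-- def __remove_asterix_sups(data):
--     """ expecting data like "** note2"
--     """
--     return re.sub(r'^\*+ ?', '', data, count=1)
-- ===== Notes on version B (the rewrite author's own statement) =====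
-- stated objective: idiomatic
-- what changed: Replaced the stateful char-counting loop with a single anchored regex substitution (count=1) whose pattern matches the leading asterisk run plus at most one following space and deletes it.
import Mathlib
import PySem

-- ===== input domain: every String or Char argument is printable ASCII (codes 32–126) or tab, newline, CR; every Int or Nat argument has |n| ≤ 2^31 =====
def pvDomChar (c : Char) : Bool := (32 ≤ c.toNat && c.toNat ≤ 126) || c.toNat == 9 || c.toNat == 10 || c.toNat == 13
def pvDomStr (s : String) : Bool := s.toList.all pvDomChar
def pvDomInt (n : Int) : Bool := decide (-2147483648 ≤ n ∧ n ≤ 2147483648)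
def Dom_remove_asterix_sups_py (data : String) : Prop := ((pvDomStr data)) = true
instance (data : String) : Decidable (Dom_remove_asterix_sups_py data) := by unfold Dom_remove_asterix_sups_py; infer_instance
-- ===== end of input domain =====

-- B replaces A's stateful counting loop with one anchored regex substitution re.sub(r'^\*+ ?', '', data, count=1) (idiomatic; same O(n) cost).

-- ===== PORT A =====
-- the counting loop of A: i starts at 0; '*' increments, then 'i and c == " "' absorbs one space
def pvCountA : List Char → Nat → Nat
  | [], i => i
  | c :: rest, i =>
    if c = '*' then pvCountA rest (i + 1)
    else if i ≠ 0 ∧ c = ' ' then i + 1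
    else i

def remove_asterix_sups_py (data : String) : String :=
  String.ofList (PySem.List.slice data.toList (some ((pvCountA data.toList 0 : Nat) : Int)) none)

-- ===== PORT B =====
-- hand port of the regex engine's match of r'^\*+ ?' against the start of the string:
-- '\*+' greedily matches the maximal leading run of '*' (must be non-empty, else no match),
-- ' ?' then matches one space if present; none = no match (re.sub leaves data unchanged).
def pvReMatchLen (l : List Char) : Option Nat :=
  if (l.takeWhile (· == '*')).length = 0 then none
  else some ((l.takeWhile (· == '*')).length +
    if (l.dropWhile (· == '*')).head? = some ' ' then 1 else 0)

-- re.sub with count=1 and replacement '': delete the matched prefix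
def remove_asterix_sups_py_alt (data : String) : String :=
  match pvReMatchLen data.toList with
  | none => data
  | some k => String.ofList (data.toList.drop k)

-- ===== PRECONDITION & SPEC =====
def Spec_remove_asterix_sups_py (data : String) (out : String) : Prop := out = remove_asterix_sups_py_alt data
instance (data : String) (out : String) : Decidable (Spec_remove_asterix_sups_py data out) := by unfold Spec_remove_asterix_sups_py; infer_instance

-- ===== CLAIM =====
def Claim_equal_remove_asterix_sups_py : Prop := ∀ (data : String), Dom_remove_asterix_sups_py data → Spec_remove_asterix_sups_py data (remove_asterix_sups_py data)

-- ===== LEMMAS AND PROOFS =====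

theorem pvCountA_pos : ∀ (l : List Char) (i : Nat), 0 < i →
    pvCountA l i = i + (l.takeWhile (· == '*')).length +
      (if (l.dropWhile (· == '*')).head? = some ' ' then 1 else 0) := by
  intro l
  induction l with
  | nil => intro i _; simp [pvCountA, List.takeWhile, List.dropWhile]
  | cons c rest ih =>
    intro i hi
    by_cases hc : c = '*'
    · subst hc
      simp only [pvCountA, reduceIte]
      rw [ih (i + 1) (by omega)]
      rw [List.takeWhile_cons_of_pos (by simp), List.dropWhile_cons_of_pos (by simp)]
      simp; omega
    · rw [List.takeWhile_cons_of_neg (by simpa using hc), List.dropWhile_cons_of_neg (by simpa using hc)]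
      by_cases hs : c = ' '
      · subst hs
        simp only [pvCountA, if_neg hc]
        simp [show i ≠ 0 by omega]
      · simp only [pvCountA, if_neg hc, if_neg (by tauto : ¬ (i ≠ 0 ∧ c = ' '))]
        simp [hs]
theorem ports_agree (l : List Char) :
    l.drop (pvCountA l 0) =
      (match pvReMatchLen l with
       | none => l
       | some k => l.drop k) := by
  cases l with
  | nil => simp [pvCountA, pvReMatchLen]
  | cons c rest =>
    by_cases hc : c = '*'
    · subst hc
      simp only [pvCountA, reduceIte]
      rw [pvCountA_pos rest 1 (by omega)]
      simp only [pvReMatchLen]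
      rw [List.takeWhile_cons_of_pos (by simp), List.dropWhile_cons_of_pos (by simp)]
      simp only [List.length_cons]
      rw [if_neg (Nat.succ_ne_zero _)]
      split
      · simp only [List.drop_succ_cons]; congr 1; omega
      · rw [show 1 + (rest.takeWhile (· == '*')).length + 0 =
            (rest.takeWhile (· == '*')).length + 1 by omega, List.drop_succ_cons]
        show _ = List.drop ((rest.takeWhile (· == '*')).length + 1 + 0) ('*' :: rest)
        rw [Nat.add_zero, List.drop_succ_cons]
    · have h0 : pvCountA (c :: rest) 0 = 0 := by
        simp [pvCountA, hc]
      rw [h0]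
      simp only [pvReMatchLen]
      rw [List.takeWhile_cons_of_neg (by simpa using hc)]
      simp

-- ===== VERDICT =====
theorem remove_asterix_sups_py_spec : Claim_equal_remove_asterix_sups_py := by
  intro data _
  show remove_asterix_sups_py data = remove_asterix_sups_py_alt data
  unfold remove_asterix_sups_py remove_asterix_sups_py_alt
  rw [PySem.List.slice_from_natCast]
  rw [ports_agree data.toList]
  cases h : pvReMatchLen data.toList with
  | none => simp
  | some k => rfl
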